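-- pv_equiv track=rewrite | github.com/robotmlg/aoc | 2025/07/main.py | part2_impl
-- ===== SOURCE A (Python) =====
-- def step(beams: set, splitters: set, height: int):
--     next_beams = list()
--     splits = 0
--
--     for beam in beams:
--         new = (beam[0] + 1, beam[1])
--         if new[0] == height:
--             break
--         elif new in splitters:
--             next_beams.append((new[0], new[1] + 1))
--             next_beams.append((new[0], new[1] - 1))
--             splits += 1
--         else:
--             next_beams.append(new)
--
--     return next_beams, splits
--
-- def visit_merge(*v):
--     merged = dict(v[0])
--
--     for b in v[1:]:
--         for k in b.keys():
--             if k not in merged: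
--                 merged[k] = b[k]
--             else:
--                 merged[k] += b[k]
--
--     return merged
--
-- def part2_impl(start, splitters, height):
--     visits = {start: 1}
--     beams, _ = step(set([start]), splitters, height)
--     if not beams:
--         # reached the bottom
--         return visits
--     elif len(beams) == 1:
--         # no split, keep going
--         return visit_merge(visits, part2_impl(list(beams)[0], splitters, height))
--     else:
--         # we split!
--         return visit_merge(visits, *[part2_impl(beam, splitters, height) for beam in beams])
-- ===== SOURCE B (Python) =====
-- def part2_impl(start, splitters, height):
--     memo = {}
--
--     def solve(beam):
--         if beam in memo:
--             return memo[beam]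
--         visits = {beam: 1}
--         r, c = beam[0] + 1, beam[1]
--         if r != height:
--             if (r, c) in splitters:
--                 kids = [solve((r, c + 1)), solve((r, c - 1))]
--             else:
--                 kids = [solve((r, c))]
--             for d in kids:
--                 for k, v in d.items():
--                     visits[k] = visits.get(k, 0) + v
--         memo[beam] = visits
--         return visits
--
--     return solve(start)
-- ===== Notes on version B (the rewrite author's own statement) =====
-- stated objective: alternative
-- what changed: A re-expands the full beam subtree at every position, recomputing shared sub-beams; B memoizes the visit dict of each distinct beam position so each cell is solved once (top-down dynamic programming over the DAG of cells).
import Mathlib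
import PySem

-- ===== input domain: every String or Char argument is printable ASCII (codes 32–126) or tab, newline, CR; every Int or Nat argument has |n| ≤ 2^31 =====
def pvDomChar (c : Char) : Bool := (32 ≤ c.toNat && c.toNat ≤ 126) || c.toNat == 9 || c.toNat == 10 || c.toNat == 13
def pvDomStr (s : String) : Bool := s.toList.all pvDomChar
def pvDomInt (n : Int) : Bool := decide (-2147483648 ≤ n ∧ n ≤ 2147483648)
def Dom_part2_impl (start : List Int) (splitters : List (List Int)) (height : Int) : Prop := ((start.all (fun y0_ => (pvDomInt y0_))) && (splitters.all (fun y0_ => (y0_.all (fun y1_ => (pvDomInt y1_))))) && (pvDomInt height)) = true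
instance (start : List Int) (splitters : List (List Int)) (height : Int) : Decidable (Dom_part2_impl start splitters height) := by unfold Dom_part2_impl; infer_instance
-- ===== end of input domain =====

-- B memoizes the recursion on the beam position, so each distinct cell's visit dict is
-- computed once instead of once per occurrence in the recursion tree; objective: alternative.

-- ===== PORT A =====
-- beam[i] (tuples of length ≥ 2 under Pre_; the default is never used there)
def pvGetI (b : List Int) (i : Int) : Int := (PySem.List.pyGet? b i).getD 0

-- the 'for beam in beams' loop of step (with its break); acc/s are next_beams/splits
def pvStepLoop (spl : List (List Int)) (h : Int) :
    List (List Int) → List (List Int) → Int → List (List Int) × Int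
  | [], acc, s => (acc, s)
  | b :: rest, acc, s =>
    let n0 := pvGetI b 0 + 1
    let n1 := pvGetI b 1
    if n0 = h then (acc, s)
    else if spl.contains [n0, n1] then
      pvStepLoop spl h rest (acc ++ [[n0, n1 + 1], [n0, n1 - 1]]) (s + 1)
    else pvStepLoop spl h rest (acc ++ [[n0, n1]]) s

def pvStep (beams spl : List (List Int)) (h : Int) : List (List Int) × Int :=
  pvStepLoop spl h beams [] 0

-- one pass of visit_merge's inner 'for k in b.keys()' loop
def pvVisitMergeOne (m b : PySem.Dict (List Int) Int) : PySem.Dict (List Int) Int :=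
  b.keys.foldl
    (fun acc k =>
      if acc.contains k = false then acc.insert k (b.getD k 0)
      else acc.insert k (acc.getD k 0 + b.getD k 0))
    m

-- visit_merge(v0, *rest)
def pvVisitMerge (v0 : PySem.Dict (List Int) Int) (rest : List (PySem.Dict (List Int) Int)) :
    PySem.Dict (List Int) Int :=
  rest.foldl pvVisitMergeOne v0

-- part2_impl's recursion; fuel is a totality device only (Pre_ makes it sufficient:
-- the row grows by 1 per call and stops exactly at height)
def pvPart2 (spl : List (List Int)) (h : Int) : Nat → List Int → PySem.Dict (List Int) Int
  | 0, st => PySem.Dict.empty.insert st 1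
  | fuel + 1, st =>
    let visits := PySem.Dict.empty.insert st 1
    match (pvStep [st] spl h).1 with
    | [] => visits
    | [b] => pvVisitMerge visits [pvPart2 spl h fuel b]
    | bs => pvVisitMerge visits (bs.map (fun b => pvPart2 spl h fuel b))

def part2_impl (start : List Int) (splitters : List (List Int)) (height : Int) :
    List (List Int × Int) :=
  (pvPart2 splitters height (height - pvGetI start 0).toNat start).items

-- ===== PORT B =====
-- B's inner 'for k, v in d.items(): visits[k] = visits.get(k, 0) + v' loop
def pvMergeB (m d : PySem.Dict (List Int) Int) : PySem.Dict (List Int) Int :=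
  d.items.foldl (fun acc kv => acc.insert kv.1 (acc.getD kv.1 0 + kv.2)) m

-- B's solve: memoized recursion on the beam; the memo dict is threaded through.
-- fuel is a totality device only (Pre_ makes it sufficient).
def pvSolve (spl : List (List Int)) (h : Int) :
    Nat → List Int → PySem.Dict (List Int) (PySem.Dict (List Int) Int) →
    PySem.Dict (List Int) Int × PySem.Dict (List Int) (PySem.Dict (List Int) Int)
  | f, b, m =>
    match m.get? b with
    | some d => (d, m)
    | none =>
      match f with
      | 0 =>
        let v := PySem.Dict.empty.insert b 1
        (v, m.insert b v)
      | f + 1 =>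
        let r := pvGetI b 0 + 1
        let c := pvGetI b 1
        if r = h then
          let v := PySem.Dict.empty.insert b 1
          (v, m.insert b v)
        else if [r, c] ∈ spl then
          let p1 := pvSolve spl h f [r, c + 1] m
          let p2 := pvSolve spl h f [r, c - 1] p1.2
          let v := pvMergeB (pvMergeB (PySem.Dict.empty.insert b 1) p1.1) p2.1
          (v, p2.2.insert b v)
        else
          let p1 := pvSolve spl h f [r, c] m
          let v := pvMergeB (PySem.Dict.empty.insert b 1) p1.1
          (v, p1.2.insert b v)

def part2_impl_alt (start : List Int) (splitters : List (List Int)) (height : Int) :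
    List (List Int × Int) :=
  (pvSolve splitters height (height - pvGetI start 0).toNat start PySem.Dict.empty).1.items

-- ===== PRECONDITION & SPEC =====
-- Pre_ excludes exactly the inputs where the Python raises: start shorter than 2
-- (IndexError on start[1]) and start[0] ≥ height (unbounded recursion, RecursionError).
def Pre_part2_impl (start : List Int) (splitters : List (List Int)) (height : Int) : Prop :=
  2 ≤ start.length ∧ start.headI < height

instance (start : List Int) (splitters : List (List Int)) (height : Int) :
    Decidable (Pre_part2_impl start splitters height) := by unfold Pre_part2_impl; infer_instance

def pvWitness_part2_impl : List Int × List (List Int) × Int := ([0, 0], [[1, 0], [2, 1]], 4)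

def Spec_part2_impl (start : List Int) (splitters : List (List Int)) (height : Int)
    (out : List (List Int × Int)) : Prop := out = part2_impl_alt start splitters height

instance (start : List Int) (splitters : List (List Int)) (height : Int)
    (out : List (List Int × Int)) : Decidable (Spec_part2_impl start splitters height out) := by
  unfold Spec_part2_impl; infer_instance

-- ===== CLAIM (what is proved, stated in full; the proofs are below) =====
def Claim_equal_part2_impl : Prop := ∀ (start : List Int) (splitters : List (List Int)) (height : Int), Dom_part2_impl start splitters height → Pre_part2_impl start splitters height → Spec_part2_impl start splitters height (part2_impl start splitters height)

-- ===== LEMMAS AND PROOFS =====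

lemma pvGetI_pair (a b : Int) : pvGetI [a, b] 0 = a ∧ pvGetI [a, b] 1 = b := by
  constructor <;> simp [pvGetI, PySem.List.pyGet?, PySem.List.pyIdx?]

-- every dict pvPart2 produces has distinct keys
lemma nodup_keys_mergeOne (m b : PySem.Dict (List Int) Int) (hm : m.keys.Nodup) :
    (pvVisitMergeOne m b).keys.Nodup := by
  unfold pvVisitMergeOne
  have : b.keys.foldl
      (fun acc k =>
        if acc.contains k = false then acc.insert k (b.getD k 0)
        else acc.insert k (acc.getD k 0 + b.getD k 0)) m =
      b.keys.foldl
        (fun acc k => acc.insert k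
          (if acc.contains k = false then b.getD k 0 else acc.getD k 0 + b.getD k 0)) m := by
    apply PySem.List.foldl_congr_mem
    intro acc k _
    split_ifs <;> rfl
  rw [this]
  exact PySem.Dict.nodup_keys_foldl_insert _ _ _ hm

lemma nodup_keys_pvPart2 (spl : List (List Int)) (h : Int) :
    ∀ (f : Nat) (b : List Int), (pvPart2 spl h f b).keys.Nodup := by
  intro f
  induction f with
  | zero =>
    intro b
    exact PySem.Dict.nodup_keys_insert _ _ _ PySem.Dict.nodup_keys_empty
  | succ f ih =>
    intro b
    have hbase : (PySem.Dict.empty.insert b (1 : Int)).keys.Nodup :=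
      PySem.Dict.nodup_keys_insert _ _ _ PySem.Dict.nodup_keys_empty
    simp only [pvPart2]
    match (pvStep [b] spl h).1 with
    | [] => exact hbase
    | [x] => exact nodup_keys_mergeOne _ _ hbase
    | x :: y :: rest =>
      simp only [pvVisitMerge, List.map_cons, List.foldl_cons]
      have : ∀ (l : List (List Int)) (acc : PySem.Dict (List Int) Int), acc.keys.Nodup →
          ((l.map (fun z => pvPart2 spl h f z)).foldl pvVisitMergeOne acc).keys.Nodup := by
        intro l
        induction l with
        | nil => intro acc hacc; exact hacc
        | cons z l ihl =>
          intro acc hacc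
          simp only [List.map_cons, List.foldl_cons]
          exact ihl _ (nodup_keys_mergeOne _ _ hacc)
      exact this rest _ (nodup_keys_mergeOne _ _ (nodup_keys_mergeOne _ _ hbase))

-- B's merge loop computes A's visit_merge pass when the merged-in dict has distinct keys
lemma mergeB_eq_mergeOne (m d : PySem.Dict (List Int) Int) (hd : d.keys.Nodup) :
    pvMergeB m d = pvVisitMergeOne m d := by
  unfold pvMergeB pvVisitMergeOne
  rw [PySem.Dict.items_eq_map_keys d hd 0, List.foldl_map]
  apply PySem.List.foldl_congr_mem
  intro acc k _
  by_cases hc : acc.contains k = false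
  · rw [if_pos hc, PySem.Dict.getD_of_not_contains acc (0 : Int) hc, zero_add]
  · rw [if_neg hc]

-- the memo only holds finished results: each entry is A's dict for its beam
def pvGood (spl : List (List Int)) (h : Int)
    (m : PySem.Dict (List Int) (PySem.Dict (List Int) Int)) : Prop :=
  ∀ k d, m.get? k = some d → d = pvPart2 spl h (h - pvGetI k 0).toNat k

-- extending a good memo with a finished result keeps it good
lemma pvGood_insert (spl : List (List Int)) (h : Int)
    (m : PySem.Dict (List Int) (PySem.Dict (List Int) Int)) (hm : pvGood spl h m)
    (b : List Int) (v : PySem.Dict (List Int) Int)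
    (hv : v = pvPart2 spl h (h - pvGetI b 0).toNat b) : pvGood spl h (m.insert b v) := by
  intro k d hk
  rw [PySem.Dict.get?_insert] at hk
  by_cases hkb : k = b
  · rw [if_pos hkb] at hk
    subst hkb
    cases hk
    exact hv
  · rw [if_neg hkb] at hk
    exact hm k d hk

-- the main invariant: with a good memo and exact fuel, solve returns A's dict and
-- leaves the memo good
lemma pvSolve_spec (spl : List (List Int)) (h : Int) :
    ∀ (f : Nat) (b : List Int) (m : PySem.Dict (List Int) (PySem.Dict (List Int) Int)),
      f = (h - pvGetI b 0).toNat → pvGetI b 0 < h → pvGood spl h m →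
      (pvSolve spl h f b m).1 = pvPart2 spl h f b ∧ pvGood spl h (pvSolve spl h f b m).2 := by
  intro f
  induction f with
  | zero => intro b m hf hlt _; omega
  | succ f ih =>
    intro b m hf hlt hm
    cases hmem : m.get? b with
    | some d =>
      have hres : pvSolve spl h (f + 1) b m = (d, m) := by
        rw [pvSolve, hmem]
      rw [hres]
      refine ⟨?_, hm⟩
      have := hm b d hmem
      rw [this, ← hf]
    | none =>
      by_cases hbot : pvGetI b 0 + 1 = h
      · have hres : pvSolve spl h (f + 1) b m =
            (PySem.Dict.empty.insert b 1, m.insert b (PySem.Dict.empty.insert b 1)) := by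
          rw [pvSolve, hmem]
          simp [hbot]
        have hA : pvPart2 spl h (f + 1) b = PySem.Dict.empty.insert b 1 := by
          simp [pvPart2, pvStep, pvStepLoop, hbot]
        rw [hres, hA]
        exact ⟨rfl, pvGood_insert spl h m hm b _ (by rw [← hf, hA])⟩
      · have hr : pvGetI b 0 + 1 < h := by omega
        have hf1 : ∀ c : Int, f = (h - pvGetI [pvGetI b 0 + 1, c] 0).toNat := by
          intro c
          rw [(pvGetI_pair _ _).1]
          omega
        have hl1 : ∀ c : Int, pvGetI [pvGetI b 0 + 1, c] 0 < h := by
          intro c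
          rw [(pvGetI_pair _ _).1]
          exact hr
        by_cases hsplm : [pvGetI b 0 + 1, pvGetI b 1] ∈ spl
        · obtain ⟨hd1, hg1⟩ := ih [pvGetI b 0 + 1, pvGetI b 1 + 1] m (hf1 _) (hl1 _) hm
          obtain ⟨hd2, hg2⟩ := ih [pvGetI b 0 + 1, pvGetI b 1 - 1]
            (pvSolve spl h f [pvGetI b 0 + 1, pvGetI b 1 + 1] m).2 (hf1 _) (hl1 _) hg1
          have hres : pvSolve spl h (f + 1) b m =
              (pvMergeB (pvMergeB (PySem.Dict.empty.insert b 1)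
                  (pvSolve spl h f [pvGetI b 0 + 1, pvGetI b 1 + 1] m).1
                )
                (pvSolve spl h f [pvGetI b 0 + 1, pvGetI b 1 - 1]
                  (pvSolve spl h f [pvGetI b 0 + 1, pvGetI b 1 + 1] m).2).1,
              ((pvSolve spl h f [pvGetI b 0 + 1, pvGetI b 1 - 1]
                  (pvSolve spl h f [pvGetI b 0 + 1, pvGetI b 1 + 1] m).2).2).insert b
                (pvMergeB (pvMergeB (PySem.Dict.empty.insert b 1)
                    (pvSolve spl h f [pvGetI b 0 + 1, pvGetI b 1 + 1] m).1)
                  (pvSolve spl h f [pvGetI b 0 + 1, pvGetI b 1 - 1]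
                    (pvSolve spl h f [pvGetI b 0 + 1, pvGetI b 1 + 1] m).2).1)) := by
            rw [pvSolve, hmem]
            simp [hbot, hsplm]
          have hA : pvPart2 spl h (f + 1) b =
              pvVisitMergeOne
                (pvVisitMergeOne (PySem.Dict.empty.insert b 1)
                  (pvPart2 spl h f [pvGetI b 0 + 1, pvGetI b 1 + 1]))
                (pvPart2 spl h f [pvGetI b 0 + 1, pvGetI b 1 - 1]) := by
            simp [pvPart2, pvStep, pvStepLoop, hbot, hsplm, pvVisitMerge]
          have hv : pvMergeB (pvMergeB (PySem.Dict.empty.insert b 1)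
                (pvSolve spl h f [pvGetI b 0 + 1, pvGetI b 1 + 1] m).1)
              (pvSolve spl h f [pvGetI b 0 + 1, pvGetI b 1 - 1]
                (pvSolve spl h f [pvGetI b 0 + 1, pvGetI b 1 + 1] m).2).1 =
              pvPart2 spl h (f + 1) b := by
            rw [hd1, hd2, hA,
              mergeB_eq_mergeOne _ _ (nodup_keys_pvPart2 spl h f _),
              mergeB_eq_mergeOne _ _ (nodup_keys_pvPart2 spl h f _)]
          rw [hres]
          exact ⟨hv, pvGood_insert spl h _ hg2 b _ (by rw [hv, ← hf])⟩
        · obtain ⟨hd1, hg1⟩ := ih [pvGetI b 0 + 1, pvGetI b 1] m (hf1 _) (hl1 _) hm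
          have hres : pvSolve spl h (f + 1) b m =
              (pvMergeB (PySem.Dict.empty.insert b 1)
                  (pvSolve spl h f [pvGetI b 0 + 1, pvGetI b 1] m).1,
              ((pvSolve spl h f [pvGetI b 0 + 1, pvGetI b 1] m).2).insert b
                (pvMergeB (PySem.Dict.empty.insert b 1)
                  (pvSolve spl h f [pvGetI b 0 + 1, pvGetI b 1] m).1)) := by
            rw [pvSolve, hmem]
            simp [hbot, hsplm]
          have hA : pvPart2 spl h (f + 1) b =
              pvVisitMergeOne (PySem.Dict.empty.insert b 1)
                (pvPart2 spl h f [pvGetI b 0 + 1, pvGetI b 1]) := by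
            simp [pvPart2, pvStep, pvStepLoop, hbot, hsplm, pvVisitMerge]
          have hv : pvMergeB (PySem.Dict.empty.insert b 1)
              (pvSolve spl h f [pvGetI b 0 + 1, pvGetI b 1] m).1 = pvPart2 spl h (f + 1) b := by
            rw [hd1, hA, mergeB_eq_mergeOne _ _ (nodup_keys_pvPart2 spl h f _)]
          rw [hres]
          exact ⟨hv, pvGood_insert spl h _ hg1 b _ (by rw [hv, ← hf])⟩

-- ===== VERDICT (by name: the statement is the Claim_ definition above) =====
theorem part2_impl_spec : Claim_equal_part2_impl := by
  intro start splitters height _ hpre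
  obtain ⟨hlen, hlt⟩ := hpre
  unfold Spec_part2_impl part2_impl part2_impl_alt
  have h0 : pvGetI start 0 = start.headI := by
    cases start with
    | nil => simp at hlen
    | cons a rest => simp [pvGetI, PySem.List.pyGet?, PySem.List.pyIdx?]
  have hlt' : pvGetI start 0 < height := by rw [h0]; exact hlt
  have hgood : pvGood splitters height PySem.Dict.empty := by
    intro k d hk
    simp [PySem.Dict.get?_empty] at hk
  obtain ⟨h1, _⟩ := pvSolve_spec splitters height (height - pvGetI start 0).toNat start
    PySem.Dict.empty rfl hlt' hgood
  rw [h1]
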